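-- pv_equiv track=rewrite | github.com/kendallm/advent-of-code | 2024/solutions/day2.py | verify_with_dampener
-- ===== SOURCE A (Python) =====
-- max_dist = 3
--
-- def verify_report(report, skip = None):
--     inc, dec = False, False
--     if skip == 0:
--         start = 1
--         skip = None
--     else:
--         start = 0
--     prev = report[start]
--     for i, curr in enumerate(report[start + 1:len(report)]):
--         if skip is not None and i+1 == skip:
--             continue
--         if curr == prev:
--             return False, i
--         dist = abs(curr - prev)
--         if (dist == 0 or dist > max_dist):
--             return False, i
--
--         if prev < curr:
--             dec = True
--         if prev > curr:
--             inc = True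
--
--         if dec and inc:
--             return False, i
--         if inc and dec:
--             return False, i
--         prev = curr
--
--     return True, -1
--
-- def verify_with_dampener(report):
--     valid, idx = verify_report(report)
--     if valid:
--         return True
--     for i in [idx, idx - 1, idx + 1]:
--         valid, _ = verify_report(report, skip=i)
--         if valid:
--             return True
--     return False
-- ===== SOURCE B (Python) =====
-- def verify_with_dampener(report):
--     def is_safe(levels):
--         diffs = [b - a for a, b in zip(levels, levels[1:])]
--         return all(1 <= d <= 3 for d in diffs) or all(-3 <= d <= -1 for d in diffs)
--     if is_safe(report):
--         return True
--     return any(is_safe(report[:j] + report[j + 1:]) for j in range(len(report)))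
-- ===== Notes on version B (the rewrite author's own statement) =====
-- stated objective: simpler
-- what changed: A finds the first failing adjacent pair with a stateful direction-flag loop and re-runs that loop skipping idx-1/idx/idx+1; B validates via a pairwise-difference list (all diffs in 1..3 or all in -3..-1) and exhaustively tries every single-element removal.
import Mathlib
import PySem

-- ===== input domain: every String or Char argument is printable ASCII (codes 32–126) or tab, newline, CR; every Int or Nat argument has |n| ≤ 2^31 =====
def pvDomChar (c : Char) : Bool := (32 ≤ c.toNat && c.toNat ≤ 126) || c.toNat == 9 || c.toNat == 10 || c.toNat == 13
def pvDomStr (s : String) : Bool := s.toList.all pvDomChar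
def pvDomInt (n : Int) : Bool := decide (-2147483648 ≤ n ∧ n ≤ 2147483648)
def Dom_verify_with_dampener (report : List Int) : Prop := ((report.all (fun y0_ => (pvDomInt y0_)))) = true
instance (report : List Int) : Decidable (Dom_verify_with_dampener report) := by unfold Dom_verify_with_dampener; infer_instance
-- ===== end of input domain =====

-- B replaces A's "find the first failing pair, then probe skipping idx-1/idx/idx+1" search by a
-- plain exhaustive scan: a direct pairwise-difference safety check tried on the report and on
-- every single-element removal (objective: simpler).

-- ===== PORT A =====
def max_dist : Int := 3

-- the `for i, curr in enumerate(report[start+1:len(report)])` loop of verify_report, with its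
-- early returns; `continue` advances the enumerate counter without moving `prev`
def vrLoop (skip : Option Int) (i : Int) (prev : Int) (inc dec : Bool) : List Int → Bool × Int
  | [] => (true, -1)
  | curr :: rest =>
    if (match skip with | some s => i + 1 == s | none => false) then
      vrLoop skip (i + 1) prev inc dec rest
    else if curr = prev then (false, i)
    else if |curr - prev| = 0 ∨ |curr - prev| > max_dist then (false, i)
    else
      let dec' := if prev < curr then true else dec
      let inc' := if prev > curr then true else inc
      if dec' && inc' then (false, i)
      else if inc' && dec' then (false, i)
      else vrLoop skip (i + 1) curr inc' dec' rest

-- verify_report; none = IndexError (report[start] out of range)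
def verify_report (report : List Int) (skip : Option Int) : Option (Bool × Int) :=
  let sp : Int × Option Int :=
    match skip with
    | some s => if s = 0 then (1, none) else (0, some s)
    | none => (0, none)
  match PySem.List.pyGet? report sp.1 with
  | none => none
  | some prev =>
    some (vrLoop sp.2 0 prev false false
      (PySem.List.slice report (some (sp.1 + 1)) (some (PySem.List.len report))))

-- the `for i in [idx, idx-1, idx+1]` probe loop; none (IndexError) cannot occur on a probed
-- report (probing only happens when the report has a failing pair, hence length ≥ 2)
def probeLoop (report : List Int) : List Int → Bool
  | [] => false
  | i :: rest =>
    match verify_report report (some i) with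
    | none => false
    | some (valid, _) => if valid then true else probeLoop report rest

def verify_with_dampener (report : List Int) : Bool :=
  match verify_report report none with
  | none => false   -- IndexError on the empty report; excluded by Pre_
  | some (valid, idx) => if valid then true else probeLoop report [idx, idx - 1, idx + 1]

-- ===== PORT B =====
def pyDiffs (levels : List Int) : List Int :=
  (levels.zip (PySem.List.slice levels (some 1) none)).map (fun p => p.2 - p.1)

def is_safe (levels : List Int) : Bool :=
  (pyDiffs levels).all (fun d => decide (1 ≤ d ∧ d ≤ 3)) ||
  (pyDiffs levels).all (fun d => decide (-3 ≤ d ∧ d ≤ -1))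

def verify_with_dampener_alt (report : List Int) : Bool :=
  is_safe report ||
    (PySem.List.pyRange 0 (PySem.List.len report) 1).any (fun j =>
      is_safe (PySem.List.slice report none (some j) ++ PySem.List.slice report (some (j + 1)) none))

-- ===== PRECONDITION & SPEC =====
-- Pre_ excludes only the empty report, on which A raises IndexError (report[0]).
def Pre_verify_with_dampener (report : List Int) : Prop := report ≠ []
instance (report : List Int) : Decidable (Pre_verify_with_dampener report) := by
  unfold Pre_verify_with_dampener; infer_instance
def pvWitness_verify_with_dampener : List Int := [1, 2, 4]

def Spec_verify_with_dampener (report : List Int) (out : Bool) : Prop :=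
  out = verify_with_dampener_alt report
instance (report : List Int) (out : Bool) : Decidable (Spec_verify_with_dampener report out) := by
  unfold Spec_verify_with_dampener; infer_instance

-- ===== CLAIM (what is proved, stated in full; the proofs are below) =====
def Claim_equal_verify_with_dampener : Prop := ∀ (report : List Int),
  Dom_verify_with_dampener report → Pre_verify_with_dampener report →
  Spec_verify_with_dampener report (verify_with_dampener report)

-- ===== LEMMAS AND PROOFS =====

-- step differences of the chain prev :: rest
def diffsOf (prev : Int) : List Int → List Int
  | [] => []
  | c :: rest => (c - prev) :: diffsOf c rest

def dfs : List Int → List Int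
  | [] => []
  | x :: tl => diffsOf x tl

def Up (d : Int) : Prop := 1 ≤ d ∧ d ≤ 3
def Dn (d : Int) : Prop := -3 ≤ d ∧ d ≤ -1

-- a difference list is safe when all steps go the same way, by 1..3
def SafeD (d : List Int) : Prop := (∀ x ∈ d, Up x) ∨ (∀ x ∈ d, Dn x)

lemma zipmap (tl : List Int) : ∀ x : Int,
    ((x :: tl).zip tl).map (fun p => p.2 - p.1) = diffsOf x tl := by
  induction tl with
  | nil => intro x; rfl
  | cons c r ih => intro x; simp [diffsOf, ← ih c]

lemma pyDiffs_eq_dfs (l : List Int) : pyDiffs l = dfs l := by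
  cases l with
  | nil => rfl
  | cons x tl => simp [pyDiffs, dfs, PySem.List.slice_from_one, ← zipmap tl x]

lemma is_safe_iff (l : List Int) : is_safe l = true ↔ SafeD (dfs l) := by
  simp [is_safe, SafeD, Up, Dn, pyDiffs_eq_dfs, List.all_eq_true]

lemma length_diffsOf (prev : Int) (rest : List Int) :
    (diffsOf prev rest).length = rest.length := by
  induction rest generalizing prev with
  | nil => rfl
  | cons c rest ih => simp [diffsOf, ih]

-- the first component of the loop result does not depend on the enumerate counter
lemma vrLoop_fst_idx (rest : List Int) : ∀ (i i' prev : Int) (inc dec : Bool),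
    (vrLoop none i prev inc dec rest).1 = (vrLoop none i' prev inc dec rest).1 := by
  induction rest with
  | nil => intros; rfl
  | cons curr r ih =>
    intro i i' prev inc dec
    simp only [vrLoop]
    split_ifs <;> first | rfl | exact ih _ _ _ _ _

-- a skip index already passed never fires
lemma vrLoop_fst_skip_le (rest : List Int) : ∀ (i s prev : Int) (inc dec : Bool), s ≤ i →
    (vrLoop (some s) i prev inc dec rest).1 = (vrLoop none i prev inc dec rest).1 := by
  induction rest with
  | nil => intros; rfl
  | cons curr r ih =>
    intro i s prev inc dec hs
    have hne : (i + 1 == s) = false := by simp; omega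
    simp only [vrLoop, hne, Bool.false_eq_true, if_false]
    split_ifs <;> first | rfl | exact ih _ _ _ _ _ (by omega)

-- skipping index s ahead of the counter is removing that element
lemma vrLoop_fst_skip_gt (rest : List Int) : ∀ (i s prev : Int) (inc dec : Bool), i < s →
    (vrLoop (some s) i prev inc dec rest).1
      = (vrLoop none i prev inc dec (rest.eraseIdx (s - i - 1).toNat)).1 := by
  induction rest with
  | nil => intros; rfl
  | cons curr r ih =>
    intro i s prev inc dec hs
    by_cases he : i + 1 = s
    · have : (s - i - 1).toNat = 0 := by omega
      simp only [vrLoop, he, beq_self_eq_true, if_true, this, List.eraseIdx]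
      rw [vrLoop_fst_skip_le r _ _ _ _ _ (by omega)]
      exact vrLoop_fst_idx r _ _ _ _ _
    · have hne : (i + 1 == s) = false := by simp [he]
      have h0 : (s - i - 1).toNat = (s - (i+1) - 1).toNat + 1 := by omega
      simp only [vrLoop, hne, h0, List.eraseIdx, Bool.false_eq_true, if_false]
      split_ifs <;> first | rfl | exact ih _ _ _ _ _ (by omega)

-- success characterization of the unskipped loop
lemma vrLoop_true_iff (rest : List Int) : ∀ (i prev : Int) (inc dec : Bool),
    (inc && dec) = false →
    ((vrLoop none i prev inc dec rest).1 = true ↔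
      ((∀ x ∈ diffsOf prev rest, Up x) ∧ inc = false) ∨
      ((∀ x ∈ diffsOf prev rest, Dn x) ∧ dec = false)) := by
  induction rest with
  | nil =>
    intro i prev inc dec h
    simp only [vrLoop, diffsOf, List.not_mem_nil, false_implies, implies_true, true_and]
    rcases Bool.and_eq_false_iff.1 h with h' | h' <;> simp [h']
  | cons curr r ih =>
    intro i prev inc dec h
    simp only [vrLoop, Bool.false_eq_true, if_false, diffsOf, List.mem_cons, forall_eq_or_imp]
    by_cases h1 : curr = prev
    · rw [if_pos h1]
      simp [h1, Up, Dn]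
    rw [if_neg h1]
    by_cases h2 : |curr - prev| = 0 ∨ |curr - prev| > max_dist
    · rw [if_pos h2]
      constructor
      · intro hc; exact absurd hc (by simp)
      · rintro (⟨⟨hu, _⟩, _⟩ | ⟨⟨hd, _⟩, _⟩)
        · have habs : |curr - prev| = curr - prev := abs_of_pos (by rcases hu with ⟨a,b⟩; omega)
          rw [habs] at h2; simp [max_dist] at h2; rcases hu with ⟨a,b⟩; omega
        · have habs : |curr - prev| = -(curr - prev) := abs_of_neg (by rcases hd with ⟨a,b⟩; omega)
          rw [habs] at h2; simp [max_dist] at h2; rcases hd with ⟨a,b⟩; omega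
    rw [if_neg h2]
    have hd3 : |curr - prev| ≤ 3 ∧ curr - prev ≠ 0 := by
      constructor
      · by_contra hle; exact h2 (Or.inr (by simp only [max_dist]; omega))
      · intro hz; exact h2 (Or.inl (by rw [hz]; simp))
    by_cases hlt : prev < curr
    · have hgt : ¬ prev > curr := by omega
      have hup : Up (curr - prev) := by
        constructor
        · omega
        · have : |curr - prev| = curr - prev := abs_of_pos (by omega)
          omega
      have hnd : ¬ Dn (curr - prev) := by intro hd; rcases hd with ⟨a,b⟩; omega
      simp only [if_pos hlt, if_neg hgt]
      cases hinc : inc with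
      | true =>
        simp only [Bool.and_true, if_pos rfl]
        constructor
        · intro hc; exact absurd hc (by simp)
        · rintro (⟨_, hif⟩ | ⟨⟨hd, _⟩, _⟩)
          · exact absurd hif (by simp)
          · exact absurd hd hnd
      | false =>
        simp only [Bool.and_false, Bool.false_and, Bool.false_eq_true, if_false]
        rw [ih (i+1) curr false true (by simp)]
        simp [hup, hnd]
    · by_cases hgt : prev > curr
      · have hdn : Dn (curr - prev) := by
          constructor
          · have : |curr - prev| = -(curr - prev) := abs_of_neg (by omega)
            omega
          · omega
        have hnu : ¬ Up (curr - prev) := by intro hu; rcases hu with ⟨a,b⟩; omega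
        simp only [if_neg hlt, if_pos hgt]
        cases hdec : dec with
        | true =>
          simp only [Bool.and_true, if_pos rfl]
          constructor
          · intro hc; exact absurd hc (by simp)
          · rintro (⟨⟨hu, _⟩, _⟩ | ⟨_, hif⟩)
            · exact absurd hu hnu
            · exact absurd hif (by simp)
        | false =>
          simp only [Bool.and_false, Bool.false_and, Bool.false_eq_true, if_false]
          rw [ih (i+1) curr true false (by simp)]
          simp [hdn, hnu]
      · exact absurd h1 (by omega)

lemma vrLoop_false (rest : List Int) : ∀ (i prev : Int) (inc dec : Bool) (k : Int),
    (inc && dec) = false →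
    vrLoop none i prev inc dec rest = (false, k) →
    ∃ (pre : List Int) (x0 : Int) (suf : List Int),
      k = i + pre.length ∧ diffsOf prev rest = pre ++ x0 :: suf ∧
      (((∀ y ∈ pre, Up y) ∧ inc = false) ∨ ((∀ y ∈ pre, Dn y) ∧ dec = false)) ∧
      ((¬ Up x0 ∧ ¬ Dn x0) ∨
       (Dn x0 ∧ (dec = true ∨ ∃ y ∈ pre, Up y)) ∨
       (Up x0 ∧ (inc = true ∨ ∃ y ∈ pre, Dn y))) := by
  induction rest with
  | nil => intro i prev inc dec k h hc; exact absurd (congrArg Prod.fst hc) (by simp [vrLoop])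
  | cons curr r ih =>
    intro i prev inc dec k h hc
    simp only [vrLoop, Bool.false_eq_true, if_false] at hc
    by_cases h1 : curr = prev
    · rw [if_pos h1] at hc
      have hk : k = i := by cases hc; rfl
      refine ⟨[], curr - prev, diffsOf curr r, by simp [hk], by simp [diffsOf], ?_, ?_⟩
      · rcases Bool.and_eq_false_iff.1 h with h' | h' <;> simp [h']
      · exact Or.inl ⟨by intro hu; rcases hu with ⟨a, b⟩; omega,
          by intro hd; rcases hd with ⟨a, b⟩; omega⟩
    rw [if_neg h1] at hc
    by_cases h2 : |curr - prev| = 0 ∨ |curr - prev| > max_dist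
    · rw [if_pos h2] at hc
      have hk : k = i := by cases hc; rfl
      refine ⟨[], curr - prev, diffsOf curr r, by simp [hk], by simp [diffsOf], ?_, ?_⟩
      · rcases Bool.and_eq_false_iff.1 h with h' | h' <;> simp [h']
      · refine Or.inl ⟨?_, ?_⟩
        · intro hu
          have habs : |curr - prev| = curr - prev := abs_of_pos (by rcases hu with ⟨a,b⟩; omega)
          rw [habs] at h2; simp [max_dist] at h2; rcases hu with ⟨a,b⟩; omega
        · intro hd
          have habs : |curr - prev| = -(curr - prev) := abs_of_neg (by rcases hd with ⟨a,b⟩; omega)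
          rw [habs] at h2; simp [max_dist] at h2; rcases hd with ⟨a,b⟩; omega
    rw [if_neg h2] at hc
    have hd3 : |curr - prev| ≤ 3 ∧ curr - prev ≠ 0 := by
      constructor
      · by_contra hle; exact h2 (Or.inr (by simp only [max_dist]; omega))
      · intro hz; exact h2 (Or.inl (by rw [hz]; simp))
    by_cases hlt : prev < curr
    · have hgt : ¬ prev > curr := by omega
      have hup : Up (curr - prev) := by
        constructor
        · omega
        · have : |curr - prev| = curr - prev := abs_of_pos (by omega)
          omega
      simp only [if_pos hlt, if_neg hgt] at hc
      cases hinc : inc with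
      | true =>
        rw [hinc] at hc
        simp only [Bool.and_true, if_pos rfl] at hc
        have hk : k = i := by cases hc; rfl
        have hdec : dec = false := by revert h; rw [hinc]; cases dec <;> simp
        refine ⟨[], curr - prev, diffsOf curr r, by simp [hk], by simp [diffsOf],
          Or.inr (by simp [hdec]), Or.inr (Or.inr ⟨hup, Or.inl rfl⟩)⟩
      | false =>
        rw [hinc] at hc
        simp only [Bool.and_false, Bool.false_and, Bool.false_eq_true, if_false] at hc
        obtain ⟨pre', x0, suf, hk, hdf, hsign, hbad⟩ := ih (i+1) curr false true k (by simp) hc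
        refine ⟨(curr - prev) :: pre', x0, suf, by simp [hk]; omega,
          by simp [diffsOf, hdf], ?_, ?_⟩
        · rcases hsign with ⟨hu, _⟩ | ⟨_, hf⟩
          · exact Or.inl ⟨by simpa [hup] using hu, rfl⟩
          · exact absurd hf (by simp)
        · rcases hbad with hcc | ⟨hd, _⟩ | ⟨hu, hor⟩
          · exact Or.inl hcc
          · exact Or.inr (Or.inl ⟨hd, Or.inr ⟨curr - prev, by simp, hup⟩⟩)
          · rcases hor with hf | ⟨y, hy, hdny⟩
            · exact absurd hf (by simp)
            · exact Or.inr (Or.inr ⟨hu, Or.inr ⟨y, by simp [hy], hdny⟩⟩)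
    · by_cases hgt : prev > curr
      · have hdn : Dn (curr - prev) := by
          constructor
          · have : |curr - prev| = -(curr - prev) := abs_of_neg (by omega)
            omega
          · omega
        simp only [if_neg hlt, if_pos hgt] at hc
        cases hdec : dec with
        | true =>
          rw [hdec] at hc
          simp only [Bool.and_true, if_pos rfl] at hc
          have hk : k = i := by cases hc; rfl
          have hinc : inc = false := by revert h; rw [hdec]; cases inc <;> simp
          refine ⟨[], curr - prev, diffsOf curr r, by simp [hk], by simp [diffsOf],
            Or.inl (by simp [hinc]), Or.inr (Or.inl ⟨hdn, Or.inl rfl⟩)⟩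
        | false =>
          rw [hdec] at hc
          simp only [Bool.and_false, Bool.false_and, Bool.false_eq_true, if_false] at hc
          obtain ⟨pre', x0, suf, hk, hdf, hsign, hbad⟩ := ih (i+1) curr true false k (by simp) hc
          refine ⟨(curr - prev) :: pre', x0, suf, by simp [hk]; omega,
            by simp [diffsOf, hdf], ?_, ?_⟩
          · rcases hsign with ⟨_, hf⟩ | ⟨hd, _⟩
            · exact absurd hf (by simp)
            · exact Or.inr ⟨by simpa [hdn] using hd, rfl⟩
          · rcases hbad with hcc | ⟨hd, hor⟩ | ⟨hu, _⟩
            · exact Or.inl hcc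
            · rcases hor with hf | ⟨y, hy, hupy⟩
              · exact absurd hf (by simp)
              · exact Or.inr (Or.inl ⟨hd, Or.inr ⟨y, by simp [hy], hupy⟩⟩)
            · exact Or.inr (Or.inr ⟨hu, Or.inr ⟨curr - prev, by simp, hdn⟩⟩)
      · exact absurd h1 (by omega)

-- removing element p+1 of the chain merges differences p and p+1
def mergeAt : Nat → List Int → List Int
  | _, [] => []
  | 0, [_] => []
  | 0, a :: b :: s => (a + b) :: s
  | p+1, a :: s => a :: mergeAt p s

lemma diffsOf_eraseIdx (rest : List Int) : ∀ (prev : Int) (p : Nat),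
    diffsOf prev (rest.eraseIdx p) = mergeAt p (diffsOf prev rest) := by
  induction rest with
  | nil => intro prev p; simp [List.eraseIdx, diffsOf, mergeAt]
  | cons c r ih =>
    intro prev p
    cases p with
    | zero =>
      cases r with
      | nil => simp [List.eraseIdx, diffsOf, mergeAt]
      | cons e r' => simp [List.eraseIdx, diffsOf, mergeAt]; try ring
    | succ p' => simp [List.eraseIdx, diffsOf, mergeAt, ih]

lemma mergeAt_append (pre : List Int) : ∀ (p : Nat) (rest : List Int), pre.length ≤ p →
    mergeAt p (pre ++ rest) = pre ++ mergeAt (p - pre.length) rest := by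
  induction pre with
  | nil => intro p rest _; simp
  | cons a pre' ih =>
    intro p rest hp
    cases p with
    | zero => simp at hp
    | succ p' =>
      simp only [List.cons_append, mergeAt, List.length_cons]
      rw [ih p' rest (by simpa using hp)]
      simp [Nat.succ_sub_succ]

lemma mergeAt_inside (P : Int → Prop) (hP : ∀ a b, P a → P b → P (a + b)) :
    ∀ (pre : List Int) (p : Nat) (rest : List Int), p + 1 < pre.length → (∀ y ∈ pre, P y) →
    ∃ pr, mergeAt p (pre ++ rest) = pr ++ rest ∧ pr ≠ [] ∧ ∀ z ∈ pr, P z := by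
  intro pre
  induction pre with
  | nil => intro p rest hp; simp at hp
  | cons a pre' ih =>
    intro p rest hp hpre
    cases p with
    | zero =>
      cases pre' with
      | nil => simp at hp
      | cons b pre'' =>
        refine ⟨(a + b) :: pre'', by simp [mergeAt], by simp, ?_⟩
        intro z hz
        rcases List.mem_cons.1 hz with rfl | hz'
        · exact hP a b (hpre a (by simp)) (hpre b (by simp))
        · exact hpre z (by simp [hz'])
    | succ p' =>
      obtain ⟨pr', heq, hne, hall⟩ := ih p' rest (by simpa using hp)
        (fun y hy => hpre y (by simp [hy]))
      exact ⟨a :: pr', by simp [mergeAt, heq], by simp, fun z hz => by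
        rcases List.mem_cons.1 hz with rfl | hz'
        · exact hpre z (by simp)
        · exact hall z hz'⟩

-- top-level loop success is exactly safety of the difference chain
lemma vrLoop_top_iff (tl : List Int) (i prev : Int) :
    (vrLoop none i prev false false tl).1 = true ↔ SafeD (diffsOf prev tl) := by
  rw [vrLoop_true_iff tl i prev false false (by simp)]
  simp [SafeD]

lemma slice_one_top (x : Int) (tl : List Int) :
    PySem.List.slice (x :: tl) (some 1) (some ((tl.length : Int) + 1)) = tl := by
  rw [show ((tl.length : Int) + 1) = ((tl.length + 1 : Nat) : Int) by push_cast; ring,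
      show (1 : Int) = ((1 : Nat) : Int) by norm_num, PySem.List.slice_natCast]
  simp

lemma vr_none (x : Int) (tl : List Int) :
    verify_report (x :: tl) none = some (vrLoop none 0 x false false tl) := by
  simp [verify_report, PySem.List.pyGet?_zero_cons]
  rw [slice_one_top]

lemma vr_skip0 (x y : Int) (tl : List Int) :
    verify_report (x :: y :: tl) (some 0) = some (vrLoop none 0 y false false tl) := by
  have hg : PySem.List.pyGet? (x :: y :: tl) 1 = some y := by
    have := PySem.List.pyGet?_ofNat (xs := x :: y :: tl) (n := 1) (by simp)
    simpa using this
  simp [verify_report, hg]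
  rw [show ((tl.length : Int) + 1 + 1) = ((tl.length + 2 : Nat) : Int) by push_cast; ring,
      show (2 : Int) = ((2 : Nat) : Int) by norm_num, PySem.List.slice_natCast]
  simp

lemma vr_skip_ne (x : Int) (tl : List Int) (s : Int) (hs : s ≠ 0) :
    verify_report (x :: tl) (some s) = some (vrLoop (some s) 0 x false false tl) := by
  simp [verify_report, hs, PySem.List.pyGet?_zero_cons]
  rw [slice_one_top]

-- probing index jn of the report is checking the report with element jn removed
lemma probe_fst (x : Int) (tl : List Int) (htl : tl ≠ []) (jn : Nat) :
    ∃ b idx, verify_report (x :: tl) (some (jn : Int)) = some (b, idx) ∧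
      (b = true ↔ SafeD (dfs ((x :: tl).eraseIdx jn))) := by
  cases jn with
  | zero =>
    cases tl with
    | nil => exact absurd rfl htl
    | cons y tl' =>
      refine ⟨(vrLoop none 0 y false false tl').1, (vrLoop none 0 y false false tl').2, ?_, ?_⟩
      · simpa using vr_skip0 x y tl'
      · simpa [List.eraseIdx, dfs] using vrLoop_top_iff tl' 0 y
  | succ n =>
    have hne : ((n + 1 : Nat) : Int) ≠ 0 := by push_cast; omega
    refine ⟨(vrLoop (some ((n + 1 : Nat) : Int)) 0 x false false tl).1,
            (vrLoop (some ((n + 1 : Nat) : Int)) 0 x false false tl).2, ?_, ?_⟩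
    · simpa using vr_skip_ne x tl _ hne
    · rw [vrLoop_fst_skip_gt tl 0 _ x false false (by push_cast; omega)]
      have harg : (((n + 1 : Nat) : Int) - 0 - 1).toNat = n := by push_cast; omega
      rw [harg]
      simpa [List.eraseIdx, dfs] using vrLoop_top_iff (tl.eraseIdx n) 0 x

-- unfolding the three-element probe loop
lemma probeLoop3 (l : List Int) (s1 s2 s3 : Int) (b1 i1 b2 i2 b3 i3 : _)
    (h1 : verify_report l (some s1) = some (b1, i1))
    (h2 : verify_report l (some s2) = some (b2, i2))
    (h3 : verify_report l (some s3) = some (b3, i3)) :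
    probeLoop l [s1, s2, s3] = (b1 || b2 || b3) := by
  simp only [probeLoop, h1, h2, h3]
  cases b1 <;> cases b2 <;> cases b3 <;> simp

-- B's outer scan, in terms of single-element removals
lemma alt_iff (l : List Int) : verify_with_dampener_alt l = true ↔
    (is_safe l = true ∨ ∃ jn : Nat, jn < l.length ∧ is_safe (l.eraseIdx jn) = true) := by
  unfold verify_with_dampener_alt
  rw [Bool.or_eq_true, List.any_eq_true]
  constructor
  · rintro (h | ⟨j, hj, hf⟩)
    · exact Or.inl h
    · rw [PySem.List.len_eq, PySem.List.mem_pyRange_one] at hj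
      refine Or.inr ⟨j.toNat, by omega, ?_⟩
      have hjc : j = (j.toNat : Int) := by omega
      rw [hjc] at hf
      rw [PySem.List.slice_to_natCast] at hf
      have : ((j.toNat : Int) + 1) = ((j.toNat + 1 : Nat) : Int) := by push_cast; ring
      rw [this, PySem.List.slice_from_natCast] at hf
      rw [List.eraseIdx_eq_take_drop_succ]
      exact hf
  · rintro (h | ⟨jn, hj, hf⟩)
    · exact Or.inl h
    · refine Or.inr ⟨(jn : Int), ?_, ?_⟩
      · rw [PySem.List.len_eq, PySem.List.mem_pyRange_one]; omega
      · rw [PySem.List.slice_to_natCast]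
        have : ((jn : Int) + 1) = ((jn + 1 : Nat) : Int) := by push_cast; ring
        rw [this, PySem.List.slice_from_natCast, ← List.eraseIdx_eq_take_drop_succ]
        exact hf

-- removing an element away from the first failure window leaves the report unsafe
lemma erase_unsafe (x : Int) (tl pre suf : List Int) (x0 : Int)
    (hdf : diffsOf x tl = pre ++ x0 :: suf)
    (hsign : (∀ y ∈ pre, Up y) ∨ (∀ y ∈ pre, Dn y))
    (hbad : (¬ Up x0 ∧ ¬ Dn x0) ∨ (Dn x0 ∧ ∃ y ∈ pre, Up y) ∨ (Up x0 ∧ ∃ y ∈ pre, Dn y))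
    (jn : Nat) (hwin : ¬(jn + 1 = pre.length ∨ jn = pre.length ∨ jn = pre.length + 1)) :
    ¬ SafeD (dfs ((x :: tl).eraseIdx jn)) := by
  push_neg at hwin
  obtain ⟨hw1, hw2, hw3⟩ := hwin
  -- a list containing a non-Up element and a non-Dn element is not SafeD
  have refute : ∀ (M : List Int), (∃ wU ∈ M, ¬ Up wU) → (∃ wD ∈ M, ¬ Dn wD) → ¬ SafeD M := by
    rintro M ⟨wU, hmU, hU⟩ ⟨wD, hmD, hD⟩ (hall | hall)
    · exact hU (hall wU hmU)
    · exact hD (hall wD hmD)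
  have hud : ∀ y, Up y → ¬ Dn y := by rintro y ⟨a, b⟩ ⟨c, d⟩; omega
  cases jn with
  | zero =>
    -- removing the head: m ≥ 2, the tail of the diff chain still has a signed prefix elem and x0
    have hm2 : 2 ≤ pre.length := by omega
    cases pre with
    | nil => simp at hm2
    | cons p0 pre' =>
      cases tl with
      | nil => simp [diffsOf] at hdf
      | cons c tl' =>
        have htail : diffsOf c tl' = pre' ++ x0 :: suf := by
          have h' := hdf
          simp only [diffsOf, List.cons_append, List.cons.injEq] at h'
          exact h'.2
        simp only [List.eraseIdx, dfs, htail]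
        cases pre' with
        | nil => simp at hm2
        | cons q pre'' =>
          rcases hbad with ⟨hnu, hnd⟩ | ⟨hd0, y, hy, hyu⟩ | ⟨hu0, y, hy, hyd⟩
          · exact refute _ ⟨x0, by simp, hnu⟩ ⟨x0, by simp, hnd⟩
          · -- prefix is all Up (it contains an Up element)
            have hallu : ∀ y ∈ p0 :: q :: pre'', Up y := by
              rcases hsign with h | h
              · exact h
              · exact absurd (h y hy) (hud y hyu)
            exact refute _ ⟨x0, by simp, fun hu => hud x0 hu hd0⟩
              ⟨q, by simp, hud q (hallu q (by simp))⟩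
          · have halld : ∀ y ∈ p0 :: q :: pre'', Dn y := by
              rcases hsign with h | h
              · exact absurd (h y hy) (fun hu => hud y hu hyd)
              · exact h
            exact refute _ ⟨q, by simp, fun hu => hud q hu (halld q (by simp))⟩
              ⟨x0, by simp, hud x0 hu0⟩
  | succ n =>
    have heq : dfs ((x :: tl).eraseIdx (n + 1)) = mergeAt n (pre ++ x0 :: suf) := by
      simp only [List.eraseIdx, dfs]
      rw [diffsOf_eraseIdx tl x n, hdf]
    rw [heq]
    by_cases hn : pre.length + 1 ≤ n
    · -- erasure strictly beyond the failing pair: pre and x0 survive unchanged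
      rw [mergeAt_append pre n _ (by omega)]
      have h1 : 1 ≤ n - pre.length := by omega
      obtain ⟨q, hq⟩ : ∃ q, n - pre.length = q + 1 := ⟨n - pre.length - 1, by omega⟩
      rw [hq]
      have hm : mergeAt (q + 1) (x0 :: suf) = x0 :: mergeAt q suf := by simp [mergeAt]
      rw [hm]
      rcases hbad with ⟨hnu, hnd⟩ | ⟨hd0, y, hy, hyu⟩ | ⟨hu0, y, hy, hyd⟩
      · exact refute _ ⟨x0, by simp, hnu⟩ ⟨x0, by simp, hnd⟩
      · exact refute _ ⟨x0, by simp, fun hu => hud x0 hu hd0⟩ ⟨y, by simp [hy], hud y hyu⟩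
      · exact refute _ ⟨y, by simp [hy], fun hu => hud y hu hyd⟩ ⟨x0, by simp, hud x0 hu0⟩
    · -- erasure strictly inside the prefix: merge two same-signed steps
      have hin : n + 1 < pre.length := by omega
      rcases hbad with ⟨hnu, hnd⟩ | ⟨hd0, y, hy, hyu⟩ | ⟨hu0, y, hy, hyd⟩
      · -- out-of-range x0 survives whatever the prefix sign
        rcases hsign with h | h
        · obtain ⟨pr, heq', hne, hall⟩ := mergeAt_inside (fun z => 1 ≤ z)
            (fun a b ha hb => by omega) pre n (x0 :: suf) hin (fun y hy => (h y hy).1)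
          rw [heq']
          exact refute _ ⟨x0, by simp, hnu⟩ ⟨x0, by simp, hnd⟩
        · obtain ⟨pr, heq', hne, hall⟩ := mergeAt_inside (fun z => z ≤ -1)
            (fun a b ha hb => by omega) pre n (x0 :: suf) hin (fun y hy => (h y hy).2)
          rw [heq']
          exact refute _ ⟨x0, by simp, hnu⟩ ⟨x0, by simp, hnd⟩
      · -- prefix all Up, x0 Dn
        have hallu : ∀ y ∈ pre, Up y := by
          rcases hsign with h | h
          · exact h
          · exact absurd (h y hy) (hud y hyu)
        obtain ⟨pr, heq', hne, hall⟩ := mergeAt_inside (fun z => 1 ≤ z)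
          (fun a b ha hb => by omega) pre n (x0 :: suf) hin (fun y hy => (hallu y hy).1)
        rw [heq']
        obtain ⟨w, hw⟩ := List.exists_mem_of_ne_nil pr hne
        exact refute _ ⟨x0, by simp, fun hu => hud x0 hu hd0⟩
          ⟨w, by simp [hw], fun hd => by have := hall w hw; rcases hd with ⟨a, b⟩; omega⟩
      · -- prefix all Dn, x0 Up
        have halld : ∀ y ∈ pre, Dn y := by
          rcases hsign with h | h
          · exact absurd (h y hy) (fun hu => hud y hu hyd)
          · exact h
        obtain ⟨pr, heq', hne, hall⟩ := mergeAt_inside (fun z => z ≤ -1)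
          (fun a b ha hb => by omega) pre n (x0 :: suf) hin (fun y hy => (halld y hy).2)
        rw [heq']
        obtain ⟨w, hw⟩ := List.exists_mem_of_ne_nil pr hne
        exact refute _ ⟨w, by simp [hw], fun hu => by have := hall w hw; rcases hu with ⟨a, b⟩; omega⟩
          ⟨x0, by simp, hud x0 hu0⟩

-- ===== VERDICT (by name: the statement is the Claim_ definition above) =====
theorem verify_with_dampener_spec : Claim_equal_verify_with_dampener := by
  intro report _ hpre
  unfold Spec_verify_with_dampener
  cases report with
  | nil => exact absurd rfl hpre
  | cons x tl =>
    apply Bool.coe_iff_coe.mp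
    set P := vrLoop none 0 x false false tl with hPdef
    have hA : verify_with_dampener (x :: tl)
        = if P.1 then true else probeLoop (x :: tl) [P.2, P.2 - 1, P.2 + 1] := by
      simp only [verify_with_dampener, vr_none x tl, ← hPdef]
    cases hval : P.1 with
    | true =>
      have hsafe : is_safe (x :: tl) = true := by
        rw [is_safe_iff]
        simpa [dfs] using (vrLoop_top_iff tl 0 x).1 hval
      rw [hA, hval, alt_iff]
      simp [hsafe]
    | false =>
      have hP : vrLoop none 0 x false false tl = (false, P.2) := by
        rw [← hPdef, ← hval]
      obtain ⟨pre, x0, suf, hk, hdf, hsign0, hbad0⟩ :=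
        vrLoop_false tl 0 x false false P.2 (by simp) hP
      set m := pre.length with hm
      have hk' : P.2 = (m : Int) := by rw [hk]; ring
      have hsign : (∀ y ∈ pre, Up y) ∨ (∀ y ∈ pre, Dn y) := by
        rcases hsign0 with ⟨h, _⟩ | ⟨h, _⟩
        · exact Or.inl h
        · exact Or.inr h
      have hbad : (¬ Up x0 ∧ ¬ Dn x0) ∨ (Dn x0 ∧ ∃ y ∈ pre, Up y) ∨
          (Up x0 ∧ ∃ y ∈ pre, Dn y) := by
        rcases hbad0 with h | ⟨h1, h2 | h2⟩ | ⟨h1, h2 | h2⟩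
        · exact Or.inl h
        · simp at h2
        · exact Or.inr (Or.inl ⟨h1, h2⟩)
        · simp at h2
        · exact Or.inr (Or.inr ⟨h1, h2⟩)
      have hlen : tl.length = m + 1 + suf.length := by
        have hl := length_diffsOf x tl
        rw [hdf] at hl
        simp at hl
        omega
      have htl : tl ≠ [] := by
        intro h
        rw [h] at hlen
        simp only [List.length_nil] at hlen
        omega
      have hnotsafe : is_safe (x :: tl) = false := by
        rw [Bool.eq_false_iff]
        intro hs
        have hs' := (vrLoop_top_iff tl 0 x).2 (by simpa [dfs] using (is_safe_iff _).1 hs)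
        rw [← hPdef, hval] at hs'
        cases hs'
      obtain ⟨b1, i1, he1, hb1⟩ := probe_fst x tl htl m
      obtain ⟨b3, i3, he3, hb3⟩ := probe_fst x tl htl (m + 1)
      have he3' : verify_report (x :: tl) (some ((m : Int) + 1)) = some (b3, i3) := by
        rw [show ((m : Int) + 1) = ((m + 1 : Nat) : Int) by push_cast; ring]
        exact he3
      -- the middle probe idx - 1
      have hmid : ∃ b2 i2, verify_report (x :: tl) (some ((m : Int) - 1)) = some (b2, i2) ∧
          (b2 = true → ∃ jn, jn < (x :: tl).length ∧ is_safe ((x :: tl).eraseIdx jn) = true) ∧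
          (∀ jn, jn + 1 = m → is_safe ((x :: tl).eraseIdx jn) = true → b2 = true) := by
        cases m_eq : m with
        | zero =>
          refine ⟨(vrLoop (some (-1)) 0 x false false tl).1,
                  (vrLoop (some (-1)) 0 x false false tl).2, ?_, ?_, ?_⟩
          · simpa using vr_skip_ne x tl (-1) (by norm_num)
          · intro hb2
            rw [vrLoop_fst_skip_le tl 0 (-1) x false false (by norm_num), ← hPdef, hval] at hb2
            cases hb2
          · intro jn hjn
            omega
        | succ n =>
          obtain ⟨b2, i2, he2, hb2⟩ := probe_fst x tl htl n
          refine ⟨b2, i2, ?_, ?_, ?_⟩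
          · rw [show (((n + 1 : Nat) : Int) - 1) = ((n : Nat) : Int) by push_cast; ring]
            exact he2
          · intro hb
            exact ⟨n, by simp; omega, (is_safe_iff _).2 (hb2.1 hb)⟩
          · intro jn hjn hsj
            have : jn = n := by omega
            subst this
            exact hb2.2 ((is_safe_iff _).1 hsj)
      obtain ⟨b2, i2, he2, hb2fwd, hb2bwd⟩ := hmid
      rw [hA, hval, hk', if_neg (by simp)]
      rw [probeLoop3 (x :: tl) _ _ _ b1 i1 b2 i2 b3 i3 he1 he2 he3']
      rw [alt_iff, hnotsafe]
      simp only [Bool.false_eq_true, false_or, Bool.or_eq_true]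
      constructor
      · rintro ((h1 | h2) | h3)
        · exact ⟨m, by simp; omega, (is_safe_iff _).2 (hb1.1 h1)⟩
        · exact hb2fwd h2
        · exact ⟨m + 1, by simp; omega, (is_safe_iff _).2 (hb3.1 h3)⟩
      · rintro ⟨jn, hjlt, hsj⟩
        by_cases hwin : jn + 1 = m ∨ jn = m ∨ jn = m + 1
        · rcases hwin with h | h | h
          · exact Or.inl (Or.inr (hb2bwd jn h hsj))
          · subst h
            exact Or.inl (Or.inl (hb1.2 ((is_safe_iff _).1 hsj)))
          · subst h
            exact Or.inr (hb3.2 ((is_safe_iff _).1 hsj))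
        · exact absurd ((is_safe_iff _).1 hsj)
            (erase_unsafe x tl pre suf x0 hdf hsign hbad jn (by rw [← hm]; exact hwin))
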